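-- pv_equiv track=rewrite | github.com/pablomf97/GamesAppBackend | gamesapp/utils/utils.py | split_platforms
-- ===== SOURCE A (Python) =====
-- def split_platforms(platforms):
--     aux = platforms.copy()
--     for platform in aux:
--         stripped_platform = platform.strip()
--         if len(stripped_platform) == 0 or stripped_platform == '/':
--             platforms.remove(platform)
--
--     for i, platform in enumerate(platforms):
--         platforms[i] = platform.strip()
--
--     return platforms
-- ===== SOURCE B (Python) =====
-- def split_platforms(platforms):
--     platforms[:] = [p.strip() for p in platforms if p.strip() not in ('', '/')]
--     return platforms
-- ===== Notes on version B (the rewrite author's own statement) =====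
-- stated objective: simpler
-- what changed: Replaces A's two passes (a remove-over-a-copy deletion loop plus a separate index-assignment stripping loop) with a single filter-and-strip comprehension assigned back in place.
import Mathlib
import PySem

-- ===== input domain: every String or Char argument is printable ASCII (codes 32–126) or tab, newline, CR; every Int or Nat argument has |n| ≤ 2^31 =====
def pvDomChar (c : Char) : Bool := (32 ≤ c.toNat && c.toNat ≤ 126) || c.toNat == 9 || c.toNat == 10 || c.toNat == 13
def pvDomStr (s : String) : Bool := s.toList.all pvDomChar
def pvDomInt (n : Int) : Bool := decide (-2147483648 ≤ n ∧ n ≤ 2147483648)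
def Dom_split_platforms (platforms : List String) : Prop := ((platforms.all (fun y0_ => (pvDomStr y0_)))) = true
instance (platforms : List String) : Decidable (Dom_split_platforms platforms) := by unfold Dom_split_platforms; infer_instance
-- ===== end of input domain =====

-- B replaces A's remove-over-a-copy deletion loop plus separate stripping loop with one
-- filter-and-strip pass (simpler); both Pythons mutate the argument list in place identically,
-- so the return-value equivalence proved here covers the side effect as well.

-- ===== PORT A =====
-- one step of A's first loop: if the stripped platform is empty or '/', remove its first
-- occurrence from the working list (platforms.remove never raises here — every visited bad
-- value still has an occurrence left — so the .getD branch is never taken)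
def splitStepA (ps : List String) (platform : String) : List String :=
  let stripped_platform := PySem.Str.strip platform
  if PySem.Str.len stripped_platform == 0 || stripped_platform == "/" then
    (PySem.List.remove? ps platform).getD ps
  else ps

def split_platforms (platforms : List String) : List String :=
  let aux := platforms
  let platforms := aux.foldl splitStepA platforms
  -- second loop: platforms[i] = platform.strip() for each index i
  platforms.map (fun platform => PySem.Str.strip platform)

-- ===== PORT B =====
def split_platforms_alt (platforms : List String) : List String :=
  platforms.filterMap (fun p =>
    let s := PySem.Str.strip p
    if s == "" || s == "/" then none else some s)

-- ===== PRECONDITION & SPEC =====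
def Spec_split_platforms (platforms : List String) (out : List String) : Prop := out = split_platforms_alt platforms
instance (platforms : List String) (out : List String) : Decidable (Spec_split_platforms platforms out) := by unfold Spec_split_platforms; infer_instance

-- ===== CLAIM (what is proved, stated in full; the proofs are below) =====
def Claim_equal_split_platforms : Prop := ∀ (platforms : List String), Dom_split_platforms platforms → Spec_split_platforms platforms (split_platforms platforms)

-- ===== LEMMAS AND PROOFS =====

-- "this platform gets removed by A's first loop"
def pvBad (p : String) : Bool :=
  PySem.Str.strip p == "" || PySem.Str.strip p == "/"

lemma splitStepA_eq (ps : List String) (p : String) :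
    splitStepA ps p = if pvBad p then (PySem.List.remove? ps p).getD ps else ps := by
  have hc : (PySem.Str.len (PySem.Str.strip p) == 0 || PySem.Str.strip p == "/") = pvBad p := by
    rw [pvBad, Bool.eq_iff_iff]
    simp [PySem.Str.len_eq, ← String.toList_inj, List.length_eq_zero_iff]
  simp only [splitStepA, hc]

lemma remove?_append_not_mem {a v : List String} {p : String} (hpa : p ∉ a) :
    PySem.List.remove? (a ++ p :: v) p = some (a ++ v) := by
  induction a with
  | nil => simp
  | cons x a ih =>
    have hx : x ≠ p := by rintro rfl; exact hpa (List.mem_cons_self)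
    rw [List.cons_append, PySem.List.remove?_cons_of_ne _ hx,
      ih (fun h => hpa (List.mem_cons_of_mem _ h))]
    rfl

-- invariant of A's first loop: with an all-good processed prefix `a` in front of the state,
-- folding the remaining suffix `v` over the state `a ++ v` filters the bad elements out of `v`
lemma foldA_invariant (v : List String) :
    ∀ a : List String, (∀ x ∈ a, pvBad x = false) →
      v.foldl splitStepA (a ++ v) = a ++ v.filter (fun p => !pvBad p) := by
  induction v with
  | nil => intro a _; simp
  | cons p v ih =>
    intro a ha
    by_cases hp : pvBad p = true
    · have hpa : p ∉ a := fun hmem => by simp [ha p hmem] at hp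
      simp only [List.foldl_cons, splitStepA_eq, hp, if_true,
        remove?_append_not_mem hpa, Option.getD_some]
      rw [ih a ha, List.filter_cons_of_neg (by simp [hp])]
    · have hp' : pvBad p = false := by simpa using hp
      have hsplit : a ++ p :: v = (a ++ [p]) ++ v := by simp
      rw [List.foldl_cons, splitStepA_eq, if_neg (by simp [hp']), hsplit]
      rw [ih (a ++ [p]) (by
          intro x hx
          rcases List.mem_append.1 hx with h | h
          · exact ha x h
          · simp only [List.mem_singleton] at h; simpa [h] using hp'),
        List.filter_cons_of_pos (by simp [hp'])]
      simp

-- B's filterMap is A's filter-then-strip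
lemma filterMap_eq_map_filter (l : List String) :
    l.filterMap (fun p =>
        let s := PySem.Str.strip p
        if s == "" || s == "/" then none else some s)
      = (l.filter (fun p => !pvBad p)).map (fun p => PySem.Str.strip p) := by
  induction l with
  | nil => rfl
  | cons p l ih =>
    by_cases hp : pvBad p = true
    · rw [List.filterMap_cons, List.filter_cons_of_neg (by simp [hp])]
      simp only [pvBad] at hp
      simp only [hp, if_true, ih]
    · have hp' : (PySem.Str.strip p == "" || PySem.Str.strip p == "/") = false := by
        simpa [pvBad] using hp
      rw [List.filterMap_cons, List.filter_cons_of_pos (by simp [pvBad, hp'])]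
      rw [if_neg (by simp [hp'])]
      simp only [List.map_cons, ih]

-- ===== VERDICT (by name: the statement is the Claim_ definition above) =====
theorem split_platforms_spec : Claim_equal_split_platforms := by
  intro platforms _
  show split_platforms platforms = split_platforms_alt platforms
  have hfold := foldA_invariant platforms [] (by simp)
  simp only [List.nil_append] at hfold
  simp only [split_platforms, split_platforms_alt, hfold, filterMap_eq_map_filter]
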